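-- pv_equiv track=rewrite | github.com/thelab33/connectatx-fundraiser | tools/aftercare_fixups.py | save_env_kv
-- ===== SOURCE A (Python) =====
-- from typing import Dict
--
-- def save_env_kv(orig: str, kv: Dict[str,str]):
--     # keep existing comments, then append normalized keys
--     out = []
--     for ln in orig.splitlines():
--         if ln.strip().startswith("#") or ln.strip() == "":
--             out.append(ln)
--     order = [
--         "FLASK_ENV","FLASK_CONFIG","FLASK_DEBUG",
--         "SECRET_KEY","DATABASE_URL",
--         "STRIPE_SECRET_KEY","STRIPE_API_KEY","STRIPE_WEBHOOK_SECRET"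
--     ]
--     for k in order:
--         if k in kv:
--             out.append(f"{k}={kv[k]}")
--     # include any other keys that were present
--     for k,v in kv.items():
--         if k not in order:
--             out.append(f"{k}={v}")
--     return "\n".join(out).rstrip() + "\n"
-- ===== SOURCE B (Python) =====
-- from typing import Dict
--
-- def save_env_kv(orig: str, kv: Dict[str, str]):
--     order = [
--         "FLASK_ENV","FLASK_CONFIG","FLASK_DEBUG",
--         "SECRET_KEY","DATABASE_URL",
--         "STRIPE_SECRET_KEY","STRIPE_API_KEY","STRIPE_WEBHOOK_SECRET"
--     ]
--     rank = {k: i for i, k in enumerate(order)}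
--     # one pass over kv: bucket every line by its rank (unknown keys -> last bucket)
--     buckets = {}
--     for k, v in kv.items():
--         buckets.setdefault(rank.get(k, len(order)), []).append(f"{k}={v}")
--     comments = [ln for ln in orig.splitlines()
--                 if ln.strip().startswith("#") or ln.strip() == ""]
--     data = [ln for i in range(len(order) + 1) for ln in buckets.get(i, [])]
--     return "\n".join(comments + data).rstrip() + "\n"
-- ===== Notes on version B (the rewrite author's own statement) =====
-- stated objective: alternative
-- what changed: Instead of scanning the fixed order list with dict membership tests and then re-scanning kv for leftovers, B precomputes a key->rank dict and makes one bucketing pass over kv.items(), concatenating the rank buckets (unknown keys in the last bucket), which reproduces A's ordering exactly.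
import Mathlib
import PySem

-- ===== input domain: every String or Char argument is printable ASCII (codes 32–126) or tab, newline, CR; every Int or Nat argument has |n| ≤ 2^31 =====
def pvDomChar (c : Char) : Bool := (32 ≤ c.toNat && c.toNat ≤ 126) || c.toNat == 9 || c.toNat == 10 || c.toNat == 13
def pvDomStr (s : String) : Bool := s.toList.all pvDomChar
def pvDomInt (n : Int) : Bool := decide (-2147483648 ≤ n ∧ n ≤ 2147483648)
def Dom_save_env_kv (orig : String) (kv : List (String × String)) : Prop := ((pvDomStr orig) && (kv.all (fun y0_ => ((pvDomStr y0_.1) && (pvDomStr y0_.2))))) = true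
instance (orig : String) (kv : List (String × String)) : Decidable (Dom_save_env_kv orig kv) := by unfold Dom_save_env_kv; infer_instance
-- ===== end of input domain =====

-- B replaces A's scan of the known-key list with membership tests and lookups by a
-- single bucketing pass over the dict keyed by a precomputed rank (objective: alternative;
-- equal return values, no side effects at stake).

-- ===== PORT A =====
def pvOrderA : List String :=
  ["FLASK_ENV", "FLASK_CONFIG", "FLASK_DEBUG",
   "SECRET_KEY", "DATABASE_URL",
   "STRIPE_SECRET_KEY", "STRIPE_API_KEY", "STRIPE_WEBHOOK_SECRET"]

def save_env_kv (orig : String) (kv : List (String × String)) : String :=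
  let d := PySem.Dict.mk kv
  -- for ln in orig.splitlines(): if ln.strip().startswith("#") or ln.strip() == "": out.append(ln)
  let out1 := (PySem.Str.splitlines orig).foldl
    (fun acc ln => if PySem.Str.startswith (PySem.Str.strip ln) "#" || PySem.Str.strip ln == "" then acc ++ [ln] else acc) []
  -- for k in order: if k in kv: out.append(f"{k}={kv[k]}")
  let out2 := pvOrderA.foldl
    (fun acc k => if d.contains k then acc ++ [k ++ "=" ++ d.getD k ""] else acc) out1
  -- for k, v in kv.items(): if k not in order: out.append(f"{k}={v}")
  let out3 := d.items.foldl
    (fun acc p => if !(pvOrderA.contains p.1) then acc ++ [p.1 ++ "=" ++ p.2] else acc) out2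
  PySem.Str.rstrip (PySem.Str.join "\n" out3) ++ "\n"

-- ===== PORT B =====
-- rank = {k: i for i, k in enumerate(order)}
def pvRankB : PySem.Dict String Int :=
  (PySem.List.enumerate pvOrderA).foldl (fun d p => d.insert p.2 p.1) (PySem.Dict.mk [])

def save_env_kv_alt (orig : String) (kv : List (String × String)) : String :=
  -- for k, v in kv.items(): buckets.setdefault(rank.get(k, len(order)), []).append(f"{k}={v}")
  let buckets := (PySem.Dict.mk kv).items.foldl
    (fun d p => d.modify (pvRankB.getD p.1 (pvOrderA.length : Int)) [] (· ++ [p.1 ++ "=" ++ p.2]))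
    (PySem.Dict.mk [])
  let comments := (PySem.Str.splitlines orig).filter
    (fun ln => PySem.Str.startswith (PySem.Str.strip ln) "#" || PySem.Str.strip ln == "")
  -- data = [ln for i in range(len(order) + 1) for ln in buckets.get(i, [])]
  let data := (PySem.List.pyRange 0 ((pvOrderA.length : Int) + 1) 1).foldl
    (fun acc i => acc ++ buckets.getD i []) []
  PySem.Str.rstrip (PySem.Str.join "\n" (comments ++ data)) ++ "\n"

-- ===== PRECONDITION & SPEC =====
-- kv stands for a Python dict, whose keys are necessarily distinct; Pre_ excludes only
-- association lists with duplicate keys, which no Python dict input can produce.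
def Pre_save_env_kv (orig : String) (kv : List (String × String)) : Prop :=
  (kv.map Prod.fst).Nodup
instance (orig : String) (kv : List (String × String)) : Decidable (Pre_save_env_kv orig kv) := by
  unfold Pre_save_env_kv; infer_instance

def pvWitness_save_env_kv : String × (List (String × String)) :=
  ("# keep\nX=1\n", [("FLASK_ENV", "prod"), ("FOO", "1")])

def Spec_save_env_kv (orig : String) (kv : List (String × String)) (out : String) : Prop := out = save_env_kv_alt orig kv
instance (orig : String) (kv : List (String × String)) (out : String) : Decidable (Spec_save_env_kv orig kv out) := by unfold Spec_save_env_kv; infer_instance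

-- ===== CLAIM (what is proved, stated in full; the proofs are below) =====
def Claim_equal_save_env_kv : Prop := ∀ (orig : String) (kv : List (String × String)), Dom_save_env_kv orig kv → Pre_save_env_kv orig kv → Spec_save_env_kv orig kv (save_env_kv orig kv)

-- ===== LEMMAS AND PROOFS =====

-- the rank dict, evaluated
theorem pvRankB_eval : pvRankB = PySem.Dict.mk
    [("FLASK_ENV", 0), ("FLASK_CONFIG", 1), ("FLASK_DEBUG", 2),
     ("SECRET_KEY", 3), ("DATABASE_URL", 4),
     ("STRIPE_SECRET_KEY", 5), ("STRIPE_API_KEY", 6), ("STRIPE_WEBHOOK_SECRET", 7)] := by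
  rfl

theorem pvRank_getD (k : String) : pvRankB.getD k 8 =
    if "FLASK_ENV" == k then 0 else if "FLASK_CONFIG" == k then 1 else
    if "FLASK_DEBUG" == k then 2 else if "SECRET_KEY" == k then 3 else
    if "DATABASE_URL" == k then 4 else if "STRIPE_SECRET_KEY" == k then 5 else
    if "STRIPE_API_KEY" == k then 6 else if "STRIPE_WEBHOOK_SECRET" == k then 7 else 8 := by
  rw [pvRankB_eval]
  simp only [PySem.Dict.getD_eq_get?_getD, PySem.Dict.get?_mk_cons]
  split_ifs <;> rfl

theorem pvRankEq (k : String) :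
    ((pvRankB.getD k 8 == (0 : Int)) = (k == "FLASK_ENV")) ∧
    ((pvRankB.getD k 8 == (1 : Int)) = (k == "FLASK_CONFIG")) ∧
    ((pvRankB.getD k 8 == (2 : Int)) = (k == "FLASK_DEBUG")) ∧
    ((pvRankB.getD k 8 == (3 : Int)) = (k == "SECRET_KEY")) ∧
    ((pvRankB.getD k 8 == (4 : Int)) = (k == "DATABASE_URL")) ∧
    ((pvRankB.getD k 8 == (5 : Int)) = (k == "STRIPE_SECRET_KEY")) ∧
    ((pvRankB.getD k 8 == (6 : Int)) = (k == "STRIPE_API_KEY")) ∧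
    ((pvRankB.getD k 8 == (7 : Int)) = (k == "STRIPE_WEBHOOK_SECRET")) ∧
    ((pvRankB.getD k 8 == (8 : Int)) = !(pvOrderA.contains k)) := by
  rw [pvRank_getD]
  unfold pvOrderA
  split_ifs with h1 h2 h3 h4 h5 h6 h7 h8
  · obtain rfl := eq_of_beq h1; decide
  · obtain rfl := eq_of_beq h2; decide
  · obtain rfl := eq_of_beq h3; decide
  · obtain rfl := eq_of_beq h4; decide
  · obtain rfl := eq_of_beq h5; decide
  · obtain rfl := eq_of_beq h6; decide
  · obtain rfl := eq_of_beq h7; decide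
  · obtain rfl := eq_of_beq h8; decide
  · have n1 : (k == "FLASK_ENV") = false := beq_eq_false_iff_ne.mpr (Ne.symm (by simpa using h1))
    have n2 : (k == "FLASK_CONFIG") = false := beq_eq_false_iff_ne.mpr (Ne.symm (by simpa using h2))
    have n3 : (k == "FLASK_DEBUG") = false := beq_eq_false_iff_ne.mpr (Ne.symm (by simpa using h3))
    have n4 : (k == "SECRET_KEY") = false := beq_eq_false_iff_ne.mpr (Ne.symm (by simpa using h4))
    have n5 : (k == "DATABASE_URL") = false := beq_eq_false_iff_ne.mpr (Ne.symm (by simpa using h5))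
    have n6 : (k == "STRIPE_SECRET_KEY") = false := beq_eq_false_iff_ne.mpr (Ne.symm (by simpa using h6))
    have n7 : (k == "STRIPE_API_KEY") = false := beq_eq_false_iff_ne.mpr (Ne.symm (by simpa using h7))
    have n8 : (k == "STRIPE_WEBHOOK_SECRET") = false := beq_eq_false_iff_ne.mpr (Ne.symm (by simpa using h8))
    refine ⟨?_, ?_, ?_, ?_, ?_, ?_, ?_, ?_, ?_⟩
    · rw [n1]; decide
    · rw [n2]; decide
    · rw [n3]; decide
    · rw [n4]; decide
    · rw [n5]; decide
    · rw [n6]; decide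
    · rw [n7]; decide
    · simp [n8]
    · simp
      exact ⟨beq_eq_false_iff_ne.mp n1, beq_eq_false_iff_ne.mp n2, beq_eq_false_iff_ne.mp n3,
        beq_eq_false_iff_ne.mp n4, beq_eq_false_iff_ne.mp n5, beq_eq_false_iff_ne.mp n6,
        beq_eq_false_iff_ne.mp n7, beq_eq_false_iff_ne.mp n8⟩


theorem pvBucketFold (kv : List (String × String)) :
    (kv.foldl
        (fun d p => d.modify (pvRankB.getD p.1 8) [] (· ++ [p.1 ++ "=" ++ p.2]))
        (PySem.Dict.mk [])) =
      ((kv.map (fun p => (pvRankB.getD p.1 8, p.1 ++ "=" ++ p.2))).foldl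
        (fun d q => d.modify q.1 [] (· ++ [q.2])) (PySem.Dict.mk [])) :=
  (List.foldl_map (f := fun p : String × String => ((pvRankB.getD p.1 8 : Int), p.1 ++ "=" ++ p.2))
     (g := fun (d : PySem.Dict Int (List String)) (q : Int × String) => d.modify q.1 [] (· ++ [q.2]))
     (l := kv) (init := PySem.Dict.mk [])).symm

-- a Nodup-keyed association list filtered at one key is that key's lookup
theorem pvFilter_key (c : String) (kv : List (String × String))
    (hnd : (kv.map Prod.fst).Nodup) :
    (kv.filter (fun p => p.1 == c)).map (fun p => p.1 ++ "=" ++ p.2)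
    = ((PySem.Dict.mk kv).get? c).elim [] (fun v => [c ++ "=" ++ v]) := by
  induction kv with
  | nil => rfl
  | cons a t ih =>
    obtain ⟨k, v⟩ := a
    simp only [List.map_cons, List.nodup_cons] at hnd
    rw [List.filter_cons, PySem.Dict.get?_mk_cons]
    by_cases hc : k = c
    · subst hc
      have hfil : t.filter (fun p => p.1 == k) = [] := by
        rw [List.filter_eq_nil_iff]
        intro p hp
        simp only [beq_iff_eq]
        intro he
        exact hnd.1 (he ▸ List.mem_map_of_mem hp)
      simp [hfil]
    · have hb : (k == c) = false := by simp [hc]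
      simp only [hb, Bool.false_eq_true, if_false]
      exact ih hnd.2

theorem pvRank_bucket_known (i : Int) (c : String)
    (h : ∀ k : String, (pvRankB.getD k 8 == i) = (k == c)) (kv : List (String × String))
    (hnd : (kv.map Prod.fst).Nodup) :
    (kv.filter (fun p => pvRankB.getD p.1 8 == i)).map (fun p => p.1 ++ "=" ++ p.2) =
    (if (PySem.Dict.mk kv).contains c then [c ++ "=" ++ (PySem.Dict.mk kv).getD c ""] else []) := by
  rw [List.filter_congr (fun p _ => h p.1)]
  rw [pvFilter_key c kv hnd]
  rw [PySem.Dict.contains_eq_isSome_get?, PySem.Dict.getD_eq_get?_getD]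
  cases (PySem.Dict.mk kv).get? c <;> rfl

theorem pvRank_bucket_unknown (kv : List (String × String)) :
    (kv.filter (fun p => pvRankB.getD p.1 8 == 8)).map (fun p => p.1 ++ "=" ++ p.2) =
    (kv.filter (fun p => !(pvOrderA.contains p.1))).map (fun p => p.1 ++ "=" ++ p.2) := by
  rw [List.filter_congr (fun p _ => (pvRankEq p.1).2.2.2.2.2.2.2.2)]

-- one bucket of B's grouping pass, evaluated
theorem pvBucket (kv : List (String × String)) (i : Int) :
    ((kv.foldl
        (fun d p => d.modify (pvRankB.getD p.1 (pvOrderA.length : Int)) [] (· ++ [p.1 ++ "=" ++ p.2]))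
        (PySem.Dict.mk [])).getD i []) =
    (kv.filter (fun p => pvRankB.getD p.1 8 == i)).map (fun p => p.1 ++ "=" ++ p.2) := by
  have h8 : (pvOrderA.length : Int) = 8 := by rfl
  rw [h8]
  rw [pvBucketFold kv]
  rw [PySem.Dict.getD_foldl_modify_append]
  rw [show PySem.Dict.mk ([] : List (Int × List String)) = PySem.Dict.empty from rfl]
  rw [PySem.Dict.getD_empty, List.nil_append]
  rw [List.filter_map, List.map_map]
  rfl

-- '(l.filter p).map f' as a flatMap, to unfold A's scan of the literal order list
theorem pvFilterMapFlat (l : List String) (p : String → Bool) (f : String → String) :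
    (l.filter p).map f = l.flatMap (fun k => if p k then [f k] else []) := by
  induction l with
  | nil => rfl
  | cons a t ih =>
    rw [List.filter_cons, List.flatMap_cons, ← ih]
    by_cases h : p a <;> simp [h]

-- the whole data section: A's two loops = B's bucket concatenation
theorem pvDataEq (kv : List (String × String)) (hnd : (kv.map Prod.fst).Nodup)
    (cs : List String) :
    kv.foldl
      (fun acc p => if !(pvOrderA.contains p.1) then acc ++ [p.1 ++ "=" ++ p.2] else acc)
      (pvOrderA.foldl
        (fun acc k => if (PySem.Dict.mk kv).contains k then acc ++ [k ++ "=" ++ (PySem.Dict.mk kv).getD k ""] else acc) cs)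
    = cs ++ (PySem.List.pyRange 0 ((pvOrderA.length : Int) + 1) 1).foldl
        (fun acc i => acc ++ (kv.foldl
          (fun d p => d.modify (pvRankB.getD p.1 (pvOrderA.length : Int)) [] (· ++ [p.1 ++ "=" ++ p.2]))
          (PySem.Dict.mk [])).getD i []) [] := by
  rw [PySem.List.foldl_append_if
        (p := fun p : String × String => !(pvOrderA.contains p.1))
        (f := fun p : String × String => p.1 ++ "=" ++ p.2)]
  rw [PySem.List.foldl_append_if
        (p := fun k => (PySem.Dict.mk kv).contains k)
        (f := fun k => k ++ "=" ++ (PySem.Dict.mk kv).getD k "")]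
  rw [PySem.List.foldl_append_eq_flatMap]
  rw [show PySem.List.pyRange 0 ((pvOrderA.length : Int) + 1) 1 = [0, 1, 2, 3, 4, 5, 6, 7, 8] from by rfl]
  simp only [List.flatMap_cons, List.flatMap_nil]
  rw [pvBucket kv 0, pvBucket kv 1, pvBucket kv 2, pvBucket kv 3, pvBucket kv 4,
      pvBucket kv 5, pvBucket kv 6, pvBucket kv 7, pvBucket kv 8]
  rw [pvRank_bucket_known 0 "FLASK_ENV" (fun k => (pvRankEq k).1) kv hnd,
      pvRank_bucket_known 1 "FLASK_CONFIG" (fun k => (pvRankEq k).2.1) kv hnd,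
      pvRank_bucket_known 2 "FLASK_DEBUG" (fun k => (pvRankEq k).2.2.1) kv hnd,
      pvRank_bucket_known 3 "SECRET_KEY" (fun k => (pvRankEq k).2.2.2.1) kv hnd,
      pvRank_bucket_known 4 "DATABASE_URL" (fun k => (pvRankEq k).2.2.2.2.1) kv hnd,
      pvRank_bucket_known 5 "STRIPE_SECRET_KEY" (fun k => (pvRankEq k).2.2.2.2.2.1) kv hnd,
      pvRank_bucket_known 6 "STRIPE_API_KEY" (fun k => (pvRankEq k).2.2.2.2.2.2.1) kv hnd,
      pvRank_bucket_known 7 "STRIPE_WEBHOOK_SECRET" (fun k => (pvRankEq k).2.2.2.2.2.2.2.1) kv hnd]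
  rw [pvRank_bucket_unknown kv]
  rw [pvFilterMapFlat]
  unfold pvOrderA
  simp only [List.flatMap_cons, List.flatMap_nil]
  simp [List.append_assoc]

-- ===== VERDICT =====
theorem save_env_kv_spec : Claim_equal_save_env_kv := by
  intro orig kv _ hpre
  unfold Spec_save_env_kv save_env_kv save_env_kv_alt
  dsimp only
  rw [PySem.List.foldl_append_if_eq_filter, List.nil_append]
  rw [pvDataEq kv hpre]
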